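-- pv_equiv track=rewrite | github.com/tqx5201/AI-Lottery-Predictor | src/ml/model_manager.py | _is_reasonable_combination
-- ===== SOURCE A (Python) =====
-- from typing import Dict, List, Optional, Any, Tuple
--
-- def _is_reasonable_combination(numbers: List[int]) -> bool:
--     """检查号码组合是否合理"""
--     try:
--         if len(numbers) <= 1:
--             return True
--
--         # 检查分布是否过于集中
--         num_range = max(numbers) - min(numbers)
--         if num_range < len(numbers):  # 过于集中
--             return False
--
--         # 检查是否有太多连号
--         sorted_nums = sorted(numbers)
--         consecutive_count = 0
--         for i in range(len(sorted_nums) - 1):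
--             if sorted_nums[i+1] - sorted_nums[i] == 1:
--                 consecutive_count += 1
--
--         if consecutive_count > len(numbers) // 2:  # 连号过多
--             return False
--
--         return True
--
--     except:
--         return True
-- ===== SOURCE B (Python) =====
-- def _is_reasonable_combination(numbers):
--     """Set-based check: spread guard, then count distinct values whose successor is also present."""
--     n = len(numbers)
--     if n <= 1:
--         return True
--     if max(numbers) - min(numbers) < n:
--         return False
--     s = set(numbers)
--     consecutive_count = sum(1 for x in s if x + 1 in s)
--     return consecutive_count <= n // 2
-- ===== Notes on version B (the rewrite author's own statement) =====
-- stated objective: simpler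
-- what changed: Replaced the sort-then-adjacent-index-scan for counting consecutive pairs by a set membership count (distinct x with x+1 present), dropped the dead try/except, and turned the final guard chain into a direct comparison.
import Mathlib
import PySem

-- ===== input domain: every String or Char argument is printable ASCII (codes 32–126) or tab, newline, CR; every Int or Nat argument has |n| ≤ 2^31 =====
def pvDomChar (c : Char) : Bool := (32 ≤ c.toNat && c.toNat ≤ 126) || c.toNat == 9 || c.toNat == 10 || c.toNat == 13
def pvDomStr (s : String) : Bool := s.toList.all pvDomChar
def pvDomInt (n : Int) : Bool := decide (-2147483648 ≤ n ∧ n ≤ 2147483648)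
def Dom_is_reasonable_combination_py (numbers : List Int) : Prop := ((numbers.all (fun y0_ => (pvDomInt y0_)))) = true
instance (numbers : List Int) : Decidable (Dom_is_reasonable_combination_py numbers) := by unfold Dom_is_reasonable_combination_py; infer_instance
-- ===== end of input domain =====

-- B replaces A's sort + adjacent-index scan by a duplicate-free set and a successor-membership count (simpler, no sort).

-- ===== PORT A =====
-- Literal port of A. The try/except only fires where a primitive would raise; max/min of the
-- nonempty list and the in-range indexing never do, so the `| _, _ => true` arm is that except path.
def is_reasonable_combination_py (numbers : List Int) : Bool :=
  if numbers.length ≤ 1 then true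
  else
    match PySem.List.max? numbers (fun x => x), PySem.List.min? numbers (fun x => x) with
    | some mx, some mn =>
        let num_range := mx - mn
        if num_range < (numbers.length : Int) then false
        else
          let sorted_nums := PySem.List.sorted numbers (fun x => x)
          -- for i in range(len(sorted_nums)-1): indices i, i+1 always in range, default never read
          let consecutive_count : Int :=
            (PySem.List.pyRange 0 ((sorted_nums.length : Int) - 1)).foldl
              (fun acc i =>
                if PySem.List.pyGetD sorted_nums (i + 1) 0 - PySem.List.pyGetD sorted_nums i 0 == 1
                then acc + 1 else acc) 0
          if consecutive_count > PySem.Int.floordiv (numbers.length : Int) 2 then false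
          else true
    | _, _ => true

-- ===== PORT B =====
def is_reasonable_combination_py_alt (numbers : List Int) : Bool :=
  let n := numbers.length
  if n ≤ 1 then true
  else
    match PySem.List.max? numbers (fun x => x) with
    | none => true  -- unreachable: max of a list of length ≥ 2 cannot raise
    | some mx =>
      match PySem.List.min? numbers (fun x => x) with
      | none => true  -- unreachable likewise
      | some mn =>
        if mx - mn < (n : Int) then false
        else
          let s : PySem.Set Int := PySem.Set.ofList numbers
          -- sum(1 for x in s if x + 1 in s): a count, independent of the set's iteration order
          let consecutive_count : Int :=
            (s.map (fun x => if PySem.Set.contains s (x + 1) then (1 : Int) else 0)).sum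
          decide (consecutive_count ≤ PySem.Int.floordiv (n : Int) 2)

-- ===== PRECONDITION & SPEC =====
def Spec_is_reasonable_combination_py (numbers : List Int) (out : Bool) : Prop := out = is_reasonable_combination_py_alt numbers
instance (numbers : List Int) (out : Bool) : Decidable (Spec_is_reasonable_combination_py numbers out) := by unfold Spec_is_reasonable_combination_py; infer_instance

-- ===== CLAIM (what is proved, stated in full; the proofs are below) =====
def Claim_equal_is_reasonable_combination_py : Prop := ∀ (numbers : List Int), Dom_is_reasonable_combination_py numbers → Spec_is_reasonable_combination_py numbers (is_reasonable_combination_py numbers)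

-- ===== LEMMAS AND PROOFS =====

-- A's adjacent-pair count, over Nat indices (what the pyRange fold computes once the casts are peeled)
def pvCountA (L : List Int) : Nat :=
  (List.range (L.length - 1)).countP
    (fun (k : Nat) => PySem.List.pyGetD L ((k : Int) + 1) 0 - PySem.List.pyGetD L (k : Int) 0 == 1)

theorem pvGetD_shift (a : Int) (M : List Int) (k : Nat) :
    PySem.List.pyGetD (a :: M) ((k : Int) + 1) 0 = PySem.List.pyGetD M (k : Int) 0 := by
  have h : ((k : Int) + 1) = ((k + 1 : Nat) : Int) := by push_cast; ring
  rw [h, PySem.List.pyGetD_natCast, PySem.List.pyGetD_natCast]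
  rfl

theorem pvCountA_cons (a b : Int) (t : List Int) :
    pvCountA (a :: b :: t) = (if b - a = 1 then 1 else 0) + pvCountA (b :: t) := by
  unfold pvCountA
  have h2 : (a :: b :: t).length - 1 = ((b :: t).length - 1) + 1 := by simp
  rw [h2, List.range_succ_eq_map, List.countP_cons, List.countP_map]
  have h0 : PySem.List.pyGetD (a :: b :: t) (((0 : Nat) : Int)) 0 = a := by
    rw [PySem.List.pyGetD_natCast]; rfl
  have h1 : PySem.List.pyGetD (a :: b :: t) (((0 : Nat) : Int) + 1) 0 = b := by
    rw [pvGetD_shift, PySem.List.pyGetD_natCast]; rfl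
  have hcomp : ∀ k : Nat, k ∈ List.range ((b :: t).length - 1) →
      (((fun (k : Nat) => PySem.List.pyGetD (a :: b :: t) ((k : Int) + 1) 0 -
          PySem.List.pyGetD (a :: b :: t) (k : Int) 0 == 1) ∘ Nat.succ) k = true
      ↔ (fun (k : Nat) => PySem.List.pyGetD (b :: t) ((k : Int) + 1) 0 -
          PySem.List.pyGetD (b :: t) (k : Int) 0 == 1) k = true) := by
    intro k _
    have hs : ((Nat.succ k : Nat) : Int) = ((k : Int) + 1) := by push_cast; ring
    simp only [Function.comp, hs, pvGetD_shift a (b :: t)]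
    have h3 : (((k + 1 : Nat)) : Int) = (k : Int) + 1 := by push_cast; ring
    rw [show ((k : Int) + 1 + 1) = ((((k + 1 : Nat)) : Int) + 1) by push_cast; ring,
      pvGetD_shift a (b :: t) (k + 1), h3]
  rw [List.countP_congr hcomp]
  rw [h1, h0]
  by_cases hd : b - a = 1 <;> simp [hd, Nat.add_comm]

-- the heart: on a nondecreasing list, the adjacent diff-1 count equals the number of
-- distinct values whose successor is also a member
theorem pvCountA_sorted : ∀ L : List Int, L.Pairwise (· ≤ ·) →
    pvCountA L = L.dedup.countP (fun x => decide ((x + 1) ∈ L)) := by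
  intro L
  induction L with
  | nil => intro _; simp [pvCountA]
  | cons a M ih =>
    intro hp
    match M with
    | [] =>
      simp [pvCountA]
    | b :: t =>
      have hab : a ≤ b := (List.pairwise_cons.mp hp).1 b (by simp)
      have hpM : (b :: t).Pairwise (· ≤ ·) := (List.pairwise_cons.mp hp).2
      have hballt : ∀ x ∈ t, b ≤ x := (List.pairwise_cons.mp hpM).1
      have hble : ∀ x ∈ b :: t, b ≤ x := by
        intro x hx; rcases List.mem_cons.mp hx with h | h
        · omega
        · exact hballt x h
      rw [pvCountA_cons, ih hpM]
      rcases eq_or_lt_of_le hab with heq | hlt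
      · subst heq
        rw [show (a :: a :: t).dedup = (a :: t).dedup from List.dedup_cons_of_mem (by simp)]
        have hne : a - a ≠ 1 := by omega
        rw [if_neg hne, Nat.zero_add]
        apply List.countP_congr
        intro x _
        simp only [decide_eq_true_iff, List.mem_cons]
        tauto
      · have hnm : a ∉ b :: t := by
          intro hmem; exact absurd (hble a hmem) (by omega)
        rw [List.dedup_cons_of_notMem hnm, List.countP_cons]
        have hcong : ∀ x ∈ (b :: t).dedup,
            ((decide ((x + 1) ∈ b :: t)) = true ↔ (decide ((x + 1) ∈ a :: b :: t)) = true) := by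
          intro x hx
          have hbx : b ≤ x := hble x (List.mem_dedup.mp hx)
          have hxa : x + 1 ≠ a := by omega
          simp only [decide_eq_true_iff, List.mem_cons]
          tauto
        rw [← List.countP_congr hcong]
        have hpa : ((decide ((a + 1) ∈ a :: b :: t)) = true) ↔ (b - a = 1) := by
          simp only [decide_eq_true_iff, List.mem_cons]
          constructor
          · rintro (h | h | h)
            · omega
            · omega
            · have := hballt _ h; omega
          · intro hd; right; left; omega
        by_cases hd : b - a = 1
        · rw [if_pos hd, if_pos (hpa.mpr hd)]; omega
        · rw [if_neg hd, if_neg (fun h => hd (hpa.mp h))]; omega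

-- B's set count coincides with the dedup-of-sorted count A's analysis produces
theorem pvSetCount_eq (numbers : List Int) :
    (PySem.Set.ofList numbers).countP
        (fun x => PySem.Set.contains (PySem.Set.ofList numbers) (x + 1))
      = (PySem.List.sorted numbers (fun x => x)).dedup.countP
        (fun x => decide ((x + 1) ∈ PySem.List.sorted numbers (fun x => x))) := by
  have hmemL : ∀ y : Int, y ∈ PySem.List.sorted numbers (fun x => x) ↔ y ∈ numbers := by
    intro y; exact (PySem.List.sorted_perm numbers (fun x => x) false).mem_iff
  have hpred : ∀ x ∈ PySem.Set.ofList numbers,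
      ((PySem.Set.contains (PySem.Set.ofList numbers) (x + 1)) = true
        ↔ (decide ((x + 1) ∈ PySem.List.sorted numbers (fun x => x))) = true) := by
    intro x _
    rw [PySem.Set.contains_iff, decide_eq_true_iff, PySem.Set.mem_ofList, hmemL]
  rw [List.countP_congr hpred]
  have hperm : (PySem.Set.ofList numbers).Perm
      (PySem.List.sorted numbers (fun x => x)).dedup := by
    rw [List.perm_ext_iff_of_nodup (PySem.Set.nodup_ofList numbers) (List.nodup_dedup _)]
    intro y
    rw [PySem.Set.mem_ofList, List.mem_dedup, hmemL]
  exact hperm.countP_eq _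

-- ===== VERDICT (by name: the statement is the Claim_ definition above) =====
theorem is_reasonable_combination_py_spec : Claim_equal_is_reasonable_combination_py := by
  intro numbers _
  unfold Spec_is_reasonable_combination_py
  unfold is_reasonable_combination_py is_reasonable_combination_py_alt
  by_cases hlen : numbers.length ≤ 1
  · simp [hlen]
  · simp only [hlen, if_false]
    have hne : numbers ≠ [] := by
      intro h; rw [h] at hlen; simp at hlen
    obtain ⟨mx, hmx⟩ : ∃ mx, PySem.List.max? numbers (fun x => x) = some mx := by
      cases h : PySem.List.max? numbers (fun x => x) with
      | none => exact absurd ((PySem.List.max?_eq_none_iff numbers (fun x => x)).mp h) hne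
      | some v => exact ⟨v, rfl⟩
    obtain ⟨mn, hmn⟩ : ∃ mn, PySem.List.min? numbers (fun x => x) = some mn := by
      cases h : PySem.List.min? numbers (fun x => x) with
      | none => exact absurd ((PySem.List.min?_eq_none_iff numbers (fun x => x)).mp h) hne
      | some v => exact ⟨v, rfl⟩
    rw [hmx, hmn]
    by_cases hrange : mx - mn < (numbers.length : Int)
    · simp [hrange]
    · simp only [hrange, if_false]
      set L := PySem.List.sorted numbers (fun x => x) with hL
      have hLlen : L.length = numbers.length :=
        (PySem.List.sorted_perm numbers (fun x => x) false).length_eq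
      -- A's fold is the Nat-indexed adjacent count
      have hAcount :
          (PySem.List.pyRange 0 ((L.length : Int) - 1)).foldl
            (fun acc i =>
              if PySem.List.pyGetD L (i + 1) 0 - PySem.List.pyGetD L i 0 == 1
              then acc + 1 else acc) 0 = (pvCountA L : Int) := by
        rw [PySem.List.foldl_if_add_one]
        have hlen1 : ((L.length : Int) - 1) = ((L.length - 1 : Nat) : Int) := by
          omega
        rw [hlen1, PySem.List.pyRange_zero_natCast, List.countP_map]
        simp only [Int.zero_add]
        unfold pvCountA
        exact congrArg _ (List.countP_congr (fun k _ => Iff.rfl))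
      -- B's sum is the set-successor count
      have hBcount :
          ((PySem.Set.ofList numbers).map
            (fun x => if PySem.Set.contains (PySem.Set.ofList numbers) (x + 1)
              then (1 : Int) else 0)).sum
          = ((PySem.Set.ofList numbers).countP
              (fun x => PySem.Set.contains (PySem.Set.ofList numbers) (x + 1)) : Int) :=
        PySem.List.sum_map_ite_one_zero _ _
      have hEq : (pvCountA L : Int)
          = ((PySem.Set.ofList numbers).countP
              (fun x => PySem.Set.contains (PySem.Set.ofList numbers) (x + 1)) : Int) := by
        rw [pvCountA_sorted L (PySem.List.sorted_pairwise numbers (fun x => x)),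
          pvSetCount_eq numbers]
      rw [hAcount, hBcount, ← hEq]
      by_cases hgt : (pvCountA L : Int) > PySem.Int.floordiv (numbers.length : Int) 2
      · rw [if_pos hgt, eq_comm, decide_eq_false_iff_not]
        omega
      · rw [if_neg hgt, eq_comm, decide_eq_true_iff]
        omega
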